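-- pv_equiv track=rewrite | github.com/abehickey/RetirementAgeCalculator | retireCalc.py | getAge
-- ===== SOURCE A (Python) =====
-- def getAge(yr):
--
--                 # Dictionary of year born with age and month for full SSA benefits
--     ageDict = {1:{"year": 1938, "age": 65, "month": 2},
--                2:{"year": 1939, "age": 65, "month": 4},
--                3:{"year": 1940, "age": 65, "month": 6},
--                4:{"year": 1941, "age": 65, "month": 8},
--                5:{"year": 1942, "age": 65, "month": 10},
--                6:{"year": 1955, "age": 66, "month": 2},
--                7:{"year": 1956, "age": 66, "month": 4},
--                8:{"year": 1957, "age": 66, "month": 6},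
--                9:{"year": 1958, "age": 66, "month": 8},
--                10:{"year": 1959, "age": 66, "month": 10}
--                }
--
--     if yr <= 1937:   # Birth year of 1937 or before returns retirement age of 65 years and 0 months
--         return 65, 0
--     elif yr >= 1960:   # Birth year of 1960 or after returns retirement age of 67 years and 0 months
--         return 67, 0
--     elif yr >= 1943 and yr <= 1954:  # Birth year of 1943 to 1954 returns retirement age of 66 years and 0 months
--         return 66, 0
--     else:   # Use Dictionary to return retirement age and month
--         for k in ageDict:
--             if ageDict[k]["year"] == yr:
--                 return ageDict[k].get("age"), ageDict[k].get("month")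
-- ===== SOURCE B (Python) =====
-- def getAge(yr):
--     # closed-form +2-months-per-year arithmetic instead of the 10-entry table
--     if yr <= 1937:
--         return 65, 0
--     if yr >= 1960:
--         return 67, 0
--     if yr <= 1942:
--         return 65, (yr - 1937) * 2
--     if yr <= 1954:
--         return 66, 0
--     return 66, (yr - 1954) * 2
-- ===== Notes on version B (the rewrite author's own statement) =====
-- stated objective: simpler
-- what changed: Replaces the 10-entry dictionary and its linear scan with closed-form +2-months-per-year arithmetic over the two transition ranges.
import Mathlib
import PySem

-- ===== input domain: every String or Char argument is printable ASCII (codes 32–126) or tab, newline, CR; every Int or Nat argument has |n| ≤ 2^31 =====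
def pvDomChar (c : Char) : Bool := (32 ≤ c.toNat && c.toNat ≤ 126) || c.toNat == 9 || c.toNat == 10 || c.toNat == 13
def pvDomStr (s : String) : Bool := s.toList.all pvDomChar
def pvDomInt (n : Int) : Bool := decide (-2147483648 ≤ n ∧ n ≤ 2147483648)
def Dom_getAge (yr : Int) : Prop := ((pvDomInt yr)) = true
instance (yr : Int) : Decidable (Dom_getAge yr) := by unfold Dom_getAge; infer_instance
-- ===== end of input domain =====

-- Header: B replaces A's 10-entry dict scan with closed-form +2-months-per-year arithmetic (simpler).


-- ===== PORT A =====
-- ageDict, flattened to (year, age, month) triples in the dict's iteration order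
def pvAgeDict : List (Int × Int × Int) :=
  [(1938, 65, 2), (1939, 65, 4), (1940, 65, 6), (1941, 65, 8), (1942, 65, 10),
   (1955, 66, 2), (1956, 66, 4), (1957, 66, 6), (1958, 66, 8), (1959, 66, 10)]

-- 'for k in ageDict: if ageDict[k]["year"] == yr: return …'; the fall-off-the-end
-- (Python's implicit None) is unreachable for any integer yr, ported as (0, 0)
def pvAgeLoop (yr : Int) : List (Int × Int × Int) → Int × Int
  | [] => (0, 0)
  | (y, a, m) :: rest => if y = yr then (a, m) else pvAgeLoop yr rest

def getAge (yr : Int) : Int × Int :=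
  if yr ≤ 1937 then (65, 0)
  else if yr ≥ 1960 then (67, 0)
  else if 1943 ≤ yr ∧ yr ≤ 1954 then (66, 0)
  else pvAgeLoop yr pvAgeDict

-- ===== PORT B =====
def getAge_alt (yr : Int) : Int × Int :=
  if yr ≤ 1937 then (65, 0)
  else if yr ≥ 1960 then (67, 0)
  else if yr ≤ 1942 then (65, (yr - 1937) * 2)
  else if yr ≤ 1954 then (66, 0)
  else (66, (yr - 1954) * 2)

-- ===== PRECONDITION & SPEC =====
def Spec_getAge (yr : Int) (out : Int × Int) : Prop := out = getAge_alt yr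
instance (yr : Int) (out : Int × Int) : Decidable (Spec_getAge yr out) := by unfold Spec_getAge; infer_instance

-- ===== CLAIM (what is proved, stated in full; the proofs are below) =====
def Claim_equal_getAge : Prop := ∀ (yr : Int), Dom_getAge yr → Spec_getAge yr (getAge yr)

-- ===== LEMMAS AND PROOFS =====

-- ===== VERDICT (by name: the statement is the Claim_ definition above) =====
theorem getAge_spec : Claim_equal_getAge := by
  unfold Claim_equal_getAge Spec_getAge
  intro yr _
  by_cases h1 : yr ≤ 1937
  · simp [getAge, getAge_alt, h1]
  · by_cases h2 : yr ≥ 1960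
    · simp [getAge, getAge_alt, h1, h2]
    · have hlo : 1938 ≤ yr := by omega
      have hhi : yr ≤ 1959 := by omega
      interval_cases yr <;> decide
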